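-- pv_equiv track=rewrite | github.com/KHJun99/SSAFY | study/0908/Flower_road/14620.py | comb_no_overlap
-- ===== SOURCE A (Python) =====
-- def no_overlap(cells_a, cells_b):
--     """
--     - isdisjoint: 두 집합에 교집합이 없으면 True, 있으면 False
--     - 반환: 겹치지 않으면 True(= 배치 가능), 겹치면 False(= 불가)
--     """
--     return cells_a.isdisjoint(cells_b)
--
-- def comb_no_overlap(m, cells_list):
--     """
--     1..m(= 후보 일련번호)의 범위에서 3개를 뽑아,
--     '세 후보 모두' 서로 겹치지 않는 조합만 모아 반환합니다.
--
--     - 이중·삼중 루프를 통해 오름차순 조합 (a < b < c)만 생성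
--     - 각 단계에서 즉시 겹침을 걸러내어(가지치기) 불필요한 탐색을 줄임
--     - 반환 형식: [(a, b, c), ...]  (a,b,c는 후보 idx)
--     """
--     res = []
--     for a in range(1, m + 1):
--         for b in range(a + 1, m + 1):
--             # 1차 가지치기: a와 b가 겹치면 더 진행할 필요 없음
--             if not no_overlap(cells_list[a], cells_list[b]):
--                 continue
--             for c in range(b + 1, m + 1):
--                 # 2차 가지치기: a-c, b-c 모두 겹치지 않아야 최종 채택
--                 if no_overlap(cells_list[a], cells_list[c]) and no_overlap(cells_list[b], cells_list[c]):
--                     res.append((a, b, c))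
--     return res
-- ===== SOURCE B (Python) =====
-- def comb_no_overlap(m, cells_list):
--     # Precompute the compatibility graph once: adj[a] = ascending list of b > a
--     # whose cells are disjoint from a's.  Triples are then triangle enumerations:
--     # for b in adj[a], every c in adj[a] that also lies in adj[b] (c > b automatic).
--     idxs = range(1, m + 1)
--     adj = {a: [b for b in range(a + 1, m + 1)
--                if cells_list[a].isdisjoint(cells_list[b])]
--            for a in idxs}
--     res = []
--     for a in idxs:
--         nbrs = adj[a]
--         for b in nbrs:
--             common = set(adj[b])
--             res.extend((a, b, c) for c in nbrs if c in common)
--     return res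
-- ===== Notes on version B (the rewrite author's own statement) =====
-- stated objective: alternative
-- what changed: B precomputes the pairwise-disjointness graph once as sorted adjacency lists and enumerates triangles by intersecting adj[a] with adj[b], instead of A's three nested range loops recomputing set disjointness per candidate c.
import Mathlib
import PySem

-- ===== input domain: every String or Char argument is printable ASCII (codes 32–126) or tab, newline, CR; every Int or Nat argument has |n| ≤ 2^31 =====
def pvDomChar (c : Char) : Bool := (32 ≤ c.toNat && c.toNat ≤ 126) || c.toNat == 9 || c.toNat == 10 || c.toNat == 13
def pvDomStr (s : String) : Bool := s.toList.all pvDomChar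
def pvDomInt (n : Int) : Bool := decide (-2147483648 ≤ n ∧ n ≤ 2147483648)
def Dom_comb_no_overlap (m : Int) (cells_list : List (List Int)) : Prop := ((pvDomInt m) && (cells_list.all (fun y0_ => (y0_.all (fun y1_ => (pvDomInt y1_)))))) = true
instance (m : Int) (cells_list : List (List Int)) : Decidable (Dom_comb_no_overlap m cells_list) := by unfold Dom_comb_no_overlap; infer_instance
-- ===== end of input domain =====

-- B precomputes the pairwise-disjointness graph once as adjacency lists and enumerates
-- triangles by neighbor-list intersection; return values proved equal to A's on Pre_.

-- ===== PORT A =====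
-- helper: no_overlap(cells_a, cells_b) = cells_a.isdisjoint(cells_b)
def no_overlap (cells_a cells_b : List Int) : Bool := PySem.Set.isdisjoint cells_a cells_b

def comb_no_overlap (m : Int) (cells_list : List (List Int)) : List (Int × Int × Int) :=
  (PySem.List.pyRange 1 (m+1) 1).foldl (fun res a =>
    (PySem.List.pyRange (a+1) (m+1) 1).foldl (fun res b =>
      if !(no_overlap (PySem.List.pyGetD cells_list a []) (PySem.List.pyGetD cells_list b [])) then
        res
      else
        (PySem.List.pyRange (b+1) (m+1) 1).foldl (fun res c =>
          if no_overlap (PySem.List.pyGetD cells_list a []) (PySem.List.pyGetD cells_list c []) &&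
             no_overlap (PySem.List.pyGetD cells_list b []) (PySem.List.pyGetD cells_list c []) then
            res ++ [(a, b, c)]
          else res) res) res) []

-- ===== PORT B =====
def comb_no_overlap_alt (m : Int) (cells_list : List (List Int)) : List (Int × Int × Int) :=
  let idxs := PySem.List.pyRange 1 (m+1) 1
  let adj : PySem.Dict Int (List Int) :=
    idxs.foldl (fun d a =>
      d.insert a ((PySem.List.pyRange (a+1) (m+1) 1).filter (fun b =>
        PySem.Set.isdisjoint (PySem.List.pyGetD cells_list a []) (PySem.List.pyGetD cells_list b [])))) PySem.Dict.empty
  idxs.foldl (fun res a =>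
    let nbrs := adj.getD a []
    nbrs.foldl (fun res b =>
      let common := PySem.Set.ofList (adj.getD b [])
      res ++ (nbrs.filter (fun c => PySem.Set.contains common c)).map (fun c => (a, b, c))) res) []

-- ===== PRECONDITION & SPEC =====
-- Pre_ excludes exactly the inputs where A raises IndexError: m ≥ 2 with fewer than m+1
-- cell sets (for m ≥ 2 A indexes cells_list[1]..cells_list[m]; for m ≤ 1 nothing is indexed).
def Pre_comb_no_overlap (m : Int) (cells_list : List (List Int)) : Prop :=
  m ≤ 1 ∨ m + 1 ≤ (cells_list.length : Int)
instance (m : Int) (cells_list : List (List Int)) : Decidable (Pre_comb_no_overlap m cells_list) := by unfold Pre_comb_no_overlap; infer_instance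

def pvWitness_comb_no_overlap : Int × List (List Int) := (3, [[], [1], [2], [3]])

def Spec_comb_no_overlap (m : Int) (cells_list : List (List Int)) (out : List (Int × Int × Int)) : Prop := out = comb_no_overlap_alt m cells_list
instance (m : Int) (cells_list : List (List Int)) (out : List (Int × Int × Int)) : Decidable (Spec_comb_no_overlap m cells_list out) := by unfold Spec_comb_no_overlap; infer_instance

-- ===== CLAIM (what is proved, stated in full; the proofs are below) =====
def Claim_equal_comb_no_overlap : Prop := ∀ (m : Int) (cells_list : List (List Int)), Dom_comb_no_overlap m cells_list → Pre_comb_no_overlap m cells_list → Spec_comb_no_overlap m cells_list (comb_no_overlap m cells_list)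

-- ===== LEMMAS AND PROOFS =====

-- the adjacency list B's dict holds at key a
def adjF (m : Int) (cells_list : List (List Int)) (a : Int) : List Int :=
  (PySem.List.pyRange (a+1) (m+1) 1).filter (fun b =>
    PySem.Set.isdisjoint (PySem.List.pyGetD cells_list a []) (PySem.List.pyGetD cells_list b []))

-- a fold of inserts whose value depends only on the key: lookup returns that value
theorem getD_foldl_insert_fn (l : List Int) (f : Int → List Int) (d : PySem.Dict Int (List Int)) (a : Int) :
    (l.foldl (fun d x => d.insert x (f x)) d).getD a [] = if a ∈ l then f a else d.getD a [] := by
  induction l generalizing d with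
  | nil => simp
  | cons x t ih =>
    simp only [List.foldl_cons, ih, PySem.Dict.getD_insert, List.mem_cons]
    by_cases hx : a = x <;> by_cases ht : a ∈ t <;> simp [hx, ht]

-- B's dict lookup is adjF on keys 1..m
theorem adj_getD (m : Int) (cells_list : List (List Int)) (x : Int) :
    ((PySem.List.pyRange 1 (m+1) 1).foldl (fun d a =>
      d.insert a ((PySem.List.pyRange (a+1) (m+1) 1).filter (fun b =>
        PySem.Set.isdisjoint (PySem.List.pyGetD cells_list a []) (PySem.List.pyGetD cells_list b [])))) PySem.Dict.empty).getD x []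
    = if x ∈ PySem.List.pyRange 1 (m+1) 1 then adjF m cells_list x else [] := by
  rw [getD_foldl_insert_fn _ (fun a => (PySem.List.pyRange (a+1) (m+1) 1).filter (fun b =>
    PySem.Set.isdisjoint (PySem.List.pyGetD cells_list a []) (PySem.List.pyGetD cells_list b [])))]
  simp [adjF]

theorem mem_adjF (m : Int) (cells_list : List (List Int)) (a c : Int) :
    c ∈ adjF m cells_list a ↔ (a + 1 ≤ c ∧ c < m + 1) ∧
      PySem.Set.isdisjoint (PySem.List.pyGetD cells_list a []) (PySem.List.pyGetD cells_list c []) = true := by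
  simp [adjF, PySem.List.mem_pyRange_one]

-- A's innermost filtered range = B's intersection of adj[a] with set(adj[b])
theorem filter_key (m : Int) (cells_list : List (List Int)) (a b : Int)
    (hab : a + 1 ≤ b) (hbm : b < m + 1) :
    (PySem.List.pyRange (b+1) (m+1) 1).filter (fun c =>
      no_overlap (PySem.List.pyGetD cells_list a []) (PySem.List.pyGetD cells_list c []) &&
      no_overlap (PySem.List.pyGetD cells_list b []) (PySem.List.pyGetD cells_list c []))
    = (adjF m cells_list a).filter (fun c => PySem.Set.contains (PySem.Set.ofList (adjF m cells_list b)) c) := by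
  have ea : adjF m cells_list a = (PySem.List.pyRange (a+1) (m+1) 1).filter (fun c =>
      PySem.Set.isdisjoint (PySem.List.pyGetD cells_list a []) (PySem.List.pyGetD cells_list c [])) := rfl
  rw [ea, List.filter_filter,
    PySem.List.pyRange_one_append (a+1) (b+1) (m+1) (by omega) (by omega), List.filter_append]
  have h1 : (PySem.List.pyRange (a+1) (b+1) 1).filter (fun c =>
      PySem.Set.contains (PySem.Set.ofList (adjF m cells_list b)) c &&
      PySem.Set.isdisjoint (PySem.List.pyGetD cells_list a []) (PySem.List.pyGetD cells_list c [])) = [] := by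
    rw [List.filter_eq_nil_iff]
    intro c hc
    rw [PySem.List.mem_pyRange_one] at hc
    simp only [PySem.Set.contains, Bool.and_eq_true, not_and]
    intro hmem _
    have : c ∈ adjF m cells_list b := by simpa [PySem.Set.mem_ofList] using hmem
    rw [mem_adjF] at this
    omega
  rw [h1, List.nil_append]
  apply List.filter_congr
  intro c hc
  rw [PySem.List.mem_pyRange_one] at hc
  have hrw : PySem.Set.contains (PySem.Set.ofList (adjF m cells_list b)) c
       = PySem.Set.isdisjoint (PySem.List.pyGetD cells_list b []) (PySem.List.pyGetD cells_list c []) := by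
    by_cases hd : PySem.Set.isdisjoint (PySem.List.pyGetD cells_list b []) (PySem.List.pyGetD cells_list c []) = true
    · rw [hd]
      have : c ∈ adjF m cells_list b := by rw [mem_adjF]; exact ⟨⟨by omega, hc.2⟩, hd⟩
      simp [PySem.Set.contains, PySem.Set.mem_ofList, this]
    · simp only [Bool.not_eq_true] at hd
      rw [hd]
      have : c ∉ adjF m cells_list b := by rw [mem_adjF]; simp [hd]
      simp [PySem.Set.contains, PySem.Set.mem_ofList, this]
  rw [hrw]
  simp [no_overlap, Bool.and_comm]

theorem comb_no_overlap_eq (m : Int) (cells_list : List (List Int)) :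
    comb_no_overlap m cells_list = comb_no_overlap_alt m cells_list := by
  unfold comb_no_overlap comb_no_overlap_alt
  dsimp only
  apply PySem.List.foldl_congr_mem
  intro res a ha
  rw [adj_getD, if_pos ha]
  calc (PySem.List.pyRange (a+1) (m+1) 1).foldl _ res
      = (adjF m cells_list a).foldl (fun res b =>
          (PySem.List.pyRange (b+1) (m+1) 1).foldl (fun res c =>
            if no_overlap (PySem.List.pyGetD cells_list a []) (PySem.List.pyGetD cells_list c []) &&
               no_overlap (PySem.List.pyGetD cells_list b []) (PySem.List.pyGetD cells_list c []) then
              res ++ [(a, b, c)]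
            else res) res) res := by
        rw [adjF, ← PySem.List.foldl_if_eq_foldl_filter]
        apply PySem.List.foldl_congr_mem
        intro r b _
        cases h : PySem.Set.isdisjoint (PySem.List.pyGetD cells_list a []) (PySem.List.pyGetD cells_list b []) <;>
          simp [no_overlap, h]
    _ = _ := by
        apply PySem.List.foldl_congr_mem
        intro r b hb
        rw [adj_getD]
        have hbidx : b ∈ PySem.List.pyRange 1 (m+1) 1 := by
          rw [PySem.List.mem_pyRange_one]
          rw [PySem.List.mem_pyRange_one] at ha
          rw [mem_adjF] at hb
          omega
        rw [if_pos hbidx]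
        rw [PySem.List.foldl_append_if]
        rw [mem_adjF] at hb
        rw [filter_key m cells_list a b hb.1.1 hb.1.2]

-- ===== VERDICT (by name: the statement is the Claim_ definition above) =====
theorem comb_no_overlap_spec : Claim_equal_comb_no_overlap := by
  intro m cells_list _ _
  unfold Spec_comb_no_overlap
  exact comb_no_overlap_eq m cells_list
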